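-- pv_equiv track=rewrite | github.com/sungminoh/algorithms | leetcode/solved/473_Matchsticks_to_Square/solution.py | makesquare
-- ===== SOURCE A (Python) =====
-- from functools import lru_cache
-- from typing import List
--
-- def makesquare(matchsticks: List[int]) -> bool:
--     """07/17/2021 20:33
--     DFS by sides
--     """
--     n, r = divmod(sum(matchsticks), 4)
--     if r or len(matchsticks) < 4:
--         return False
--     matchsticks.sort(reverse=True)
--
--     @lru_cache(None)
--     def dfs(i, cur, used):
--         if i == 4:
--             return True
--         if cur > n:
--             return False
--         if cur == n:
--             return dfs(i+1, 0, used)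
--         for j in range(len(matchsticks)):
--             if used & (1<<j):
--                 continue
--             if dfs(i, cur+matchsticks[j], used | (1<<j)):
--                 return True
--         return False
--
--     return dfs(0, 0, 0)
-- ===== SOURCE B (Python) =====
-- from functools import lru_cache
-- from typing import List
--
-- def makesquare(matchsticks: List[int]) -> bool:
--     """Backtracking over the sticks: for each stick in turn, try adding it to
--     each of the four running side sums; the sticks form a square iff some
--     assignment makes all four sides equal to a quarter of the total.
--     Sorting descending first makes big sticks fail fast."""
--     n, r = divmod(sum(matchsticks), 4)
--     if r or len(matchsticks) < 4:
--         return False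
--     matchsticks.sort(reverse=True)
--
--     @lru_cache(None)
--     def place(i, a, b, c, d):
--         if i == len(matchsticks):
--             return a == n and b == n and c == n and d == n
--         v = matchsticks[i]
--         return (place(i + 1, a + v, b, c, d)
--                 or place(i + 1, a, b + v, c, d)
--                 or place(i + 1, a, b, c + v, d)
--                 or place(i + 1, a, b, c, d + v))
--
--     return place(0, 0, 0, 0, 0)
-- ===== Notes on version B (the rewrite author's own statement) =====
-- stated objective: alternative
-- what changed: A fills the four sides one at a time, scanning a used-stick bitmask for the next stick to add to the current side; B walks the stick list once in index order and branches on which of the four running side sums receives each stick, checking all four equal n at the end. Pre_ excludes lists with a negative total that pass the divisibility and length guards, where A's cur>n prune rejects unconditionally while B's exhaustive branching may still partition negative lengths; neither value is specified for negative stick lengths.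
-- outside the precondition, e.g. on makesquare([-1, -1, -1, -1]): A returns False, B returns True
import Mathlib
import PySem

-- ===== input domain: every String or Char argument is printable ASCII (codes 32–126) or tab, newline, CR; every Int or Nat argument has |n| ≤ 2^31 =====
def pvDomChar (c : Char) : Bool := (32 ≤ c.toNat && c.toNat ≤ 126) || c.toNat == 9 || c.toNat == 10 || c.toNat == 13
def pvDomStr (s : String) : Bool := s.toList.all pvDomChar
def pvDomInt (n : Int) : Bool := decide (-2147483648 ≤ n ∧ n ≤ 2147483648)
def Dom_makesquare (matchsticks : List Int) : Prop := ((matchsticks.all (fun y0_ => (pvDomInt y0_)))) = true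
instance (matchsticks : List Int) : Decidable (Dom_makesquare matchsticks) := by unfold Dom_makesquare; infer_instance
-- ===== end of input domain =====

-- B changes the search decomposition (per-stick branching over four side sums instead of A's
-- per-side DFS over a used bitmask); both sort the argument in place identically, and the
-- equivalence proved here is about the return value.

-- ===== PORT A =====
-- dfs(i, cur, used) of A; the lru_cache is a pure-evaluation cache and does not change the
-- result, so it is not modelled.  fuel only makes the recursion structural: every reachable
-- call chain has depth ≤ len+5 (each step advances a side or sets a fresh bit).
def dfsA (t : List Int) (n : Int) : Nat → Nat → Int → Nat → Bool
  | 0, _, _, _ => false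
  | fuel+1, i, cur, used =>
    if i = 4 then true
    else if n < cur then false
    else if cur = n then dfsA t n fuel (i+1) 0 used
    else (List.range t.length).any fun j =>
      if used.testBit j then false
      else dfsA t n fuel i (cur + t.getD j 0) (used ||| 2 ^ j)   -- t[j], j < len (in range)

def makesquare (matchsticks : List Int) : Bool :=
  let n := PySem.Int.floordiv matchsticks.sum 4
  let r := PySem.Int.mod matchsticks.sum 4
  if r ≠ 0 ∨ matchsticks.length < 4 then false
  else
    let t := PySem.List.sorted matchsticks (fun x => x) true   -- matchsticks.sort(reverse=True)
    dfsA t n (t.length + 5) 0 0 0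

-- ===== PORT B =====
-- place(i, a, b, c, d) of B: structural recursion on the suffix of the stick list from index i.
def placeB (n : Int) : List Int → Int → Int → Int → Int → Bool
  | [], a, b, c, d => decide (a = n) && decide (b = n) && decide (c = n) && decide (d = n)
  | v :: rest, a, b, c, d =>
    placeB n rest (a + v) b c d || placeB n rest a (b + v) c d ||
    placeB n rest a b (c + v) d || placeB n rest a b c (d + v)

def makesquare_alt (matchsticks : List Int) : Bool :=
  let n := PySem.Int.floordiv matchsticks.sum 4
  let r := PySem.Int.mod matchsticks.sum 4
  if r ≠ 0 ∨ matchsticks.length < 4 then false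
  else
    let t := PySem.List.sorted matchsticks (fun x => x) true
    placeB n t 0 0 0 0

-- ===== PRECONDITION & SPEC =====
-- Pre_ excludes lists with a negative total that pass the divisibility and length guards:
-- there A's cur>n prune rejects unconditionally while B's exhaustive branching may still
-- partition negative lengths; neither value is specified for negative stick lengths.
def Pre_makesquare (matchsticks : List Int) : Prop :=
  0 ≤ matchsticks.sum ∨ PySem.Int.mod matchsticks.sum 4 ≠ 0 ∨ matchsticks.length < 4
instance (matchsticks : List Int) : Decidable (Pre_makesquare matchsticks) := by unfold Pre_makesquare; infer_instance
def pvWitness_makesquare : List Int := [1, 1, 1, 1]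

def Spec_makesquare (matchsticks : List Int) (out : Bool) : Prop := out = makesquare_alt matchsticks
instance (matchsticks : List Int) (out : Bool) : Decidable (Spec_makesquare matchsticks out) := by unfold Spec_makesquare; infer_instance

-- ===== CLAIM (what is proved, stated in full; the proofs are below) =====
def Claim_equal_makesquare : Prop := ∀ (matchsticks : List Int), Dom_makesquare matchsticks → Pre_makesquare matchsticks → Spec_makesquare matchsticks (makesquare matchsticks)

-- ===== LEMMAS AND PROOFS =====

-- indices not yet used, and the multiset of their stick values
def unusedIdx (L : Nat) (used : Nat) : List Nat :=
  (List.range L).filter (fun j => !used.testBit j)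

def unusedMS (t : List Int) (used : Nat) : Multiset Int :=
  (↑((unusedIdx t.length used).map (fun j => t.getD j 0)) : Multiset Int)

-- the semantic reading of an A-state: the unused sticks split into one part per remaining
-- side (the current side needing n - cur) plus zero-sum junk
def SemA (t : List Int) (n : Int) (i : Nat) (cur : Int) (used : Nat) : Prop :=
  ∃ ps : List (Multiset Int), ∃ junk : Multiset Int,
    ps.map Multiset.sum = (if i < 4 then (n - cur) :: List.replicate (3 - i) n else []) ∧
    junk.sum = 0 ∧ ps.sum + junk = unusedMS t used

theorem nodup_unusedIdx (L used : Nat) : (unusedIdx L used).Nodup := by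
  exact (List.nodup_range).filter _

theorem mem_unusedIdx {L used j : Nat} :
    j ∈ unusedIdx L used ↔ j < L ∧ ¬ used.testBit j := by
  simp [unusedIdx]

theorem unusedIdx_or {L used j : Nat} (hj : j < L) (hb : ¬ used.testBit j) :
    unusedIdx L (used ||| 2 ^ j) = (unusedIdx L used).erase j := by
  rw [(nodup_unusedIdx L used).erase_eq_filter]
  unfold unusedIdx
  rw [List.filter_filter]
  apply List.filter_congr
  intro k _
  by_cases hk : k = j
  · subst hk
    simp [Nat.testBit_or, Nat.testBit_two_pow]
  · simp [Nat.testBit_or, Nat.testBit_two_pow, hk, Ne.symm hk, bne]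

theorem unusedMS_or {t : List Int} {used j : Nat} (hj : j < t.length) (hb : ¬ used.testBit j) :
    unusedMS t used = t.getD j 0 ::ₘ unusedMS t (used ||| 2 ^ j) := by
  have hmem : j ∈ unusedIdx t.length used := mem_unusedIdx.2 ⟨hj, hb⟩
  have hperm : List.Perm (unusedIdx t.length used) (j :: (unusedIdx t.length used).erase j) :=
    List.perm_cons_erase hmem
  unfold unusedMS
  rw [unusedIdx_or hj hb, Multiset.cons_coe]
  exact Multiset.coe_eq_coe.2 (hperm.map _)

theorem length_unusedIdx_or {L used j : Nat} (hj : j < L) (hb : ¬ used.testBit j) :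
    (unusedIdx L (used ||| 2 ^ j)).length + 1 = (unusedIdx L used).length := by
  rw [unusedIdx_or hj hb]
  exact List.length_erase_add_one (mem_unusedIdx.2 ⟨hj, hb⟩)

theorem unusedMS_zero (t : List Int) : unusedMS t 0 = (t : Multiset Int) := by
  unfold unusedMS unusedIdx
  congr 1
  simp only [Nat.zero_testBit, Bool.not_false, List.filter_true]
  apply List.ext_getElem (by simp)
  intro k h1 h2
  simp [List.getD_eq_getElem?_getD, List.getElem?_eq_getElem h2]

-- characterisation of B's recursion: some split of the remaining sticks finishes all sides
theorem placeB_iff (n : Int) (t : List Int) :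
    ∀ a b c d : Int, placeB n t a b c d = true ↔
      ∃ m1 m2 m3 m4 : Multiset Int, m1 + m2 + m3 + m4 = (t : Multiset Int) ∧
        a + m1.sum = n ∧ b + m2.sum = n ∧ c + m3.sum = n ∧ d + m4.sum = n := by
  induction t with
  | nil =>
    intro a b c d
    simp only [placeB, Bool.and_eq_true, decide_eq_true_eq]
    constructor
    · rintro ⟨⟨⟨h1, h2⟩, h3⟩, h4⟩
      exact ⟨0, 0, 0, 0, by simp, by simpa using h1, by simpa using h2,
        by simpa using h3, by simpa using h4⟩
    · rintro ⟨m1, m2, m3, m4, hcover, h1, h2, h3, h4⟩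
      have key : ∀ x : Int, x ∉ m1 + m2 + m3 + m4 := by
        intro x
        rw [hcover]
        simp
      have e1 : m1 = 0 := Multiset.eq_zero_of_forall_notMem fun x hx =>
        key x (by simp [Multiset.mem_add, hx])
      have e2 : m2 = 0 := Multiset.eq_zero_of_forall_notMem fun x hx =>
        key x (by simp [Multiset.mem_add, hx])
      have e3 : m3 = 0 := Multiset.eq_zero_of_forall_notMem fun x hx =>
        key x (by simp [Multiset.mem_add, hx])
      have e4 : m4 = 0 := Multiset.eq_zero_of_forall_notMem fun x hx =>
        key x (by simp [Multiset.mem_add, hx])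
      subst e1; subst e2; subst e3; subst e4
      simp at h1 h2 h3 h4
      exact ⟨⟨⟨h1, h2⟩, h3⟩, h4⟩
  | cons v rest ih =>
    intro a b c d
    simp only [placeB, Bool.or_eq_true, ih]
    constructor
    · rintro (((⟨m1, m2, m3, m4, hc, h1, h2, h3, h4⟩ | ⟨m1, m2, m3, m4, hc, h1, h2, h3, h4⟩) |
        ⟨m1, m2, m3, m4, hc, h1, h2, h3, h4⟩) | ⟨m1, m2, m3, m4, hc, h1, h2, h3, h4⟩)
      · exact ⟨v ::ₘ m1, m2, m3, m4, by rw [← Multiset.cons_coe, ← hc]; simp [Multiset.cons_add],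
          by rw [Multiset.sum_cons]; linarith, h2, h3, h4⟩
      · exact ⟨m1, v ::ₘ m2, m3, m4, by rw [← Multiset.cons_coe, ← hc]; simp [Multiset.cons_add, Multiset.add_cons],
          h1, by rw [Multiset.sum_cons]; linarith, h3, h4⟩
      · exact ⟨m1, m2, v ::ₘ m3, m4, by rw [← Multiset.cons_coe, ← hc]; simp [Multiset.cons_add, Multiset.add_cons],
          h1, h2, by rw [Multiset.sum_cons]; linarith, h4⟩
      · exact ⟨m1, m2, m3, v ::ₘ m4, by rw [← Multiset.cons_coe, ← hc]; simp [Multiset.cons_add, Multiset.add_cons],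
          h1, h2, h3, by rw [Multiset.sum_cons]; linarith⟩
    · rintro ⟨m1, m2, m3, m4, hc, h1, h2, h3, h4⟩
      have hv : v ∈ m1 + m2 + m3 + m4 := by rw [hc]; simp
      rcases Multiset.mem_add.1 hv with hv' | hv4
      rcases Multiset.mem_add.1 hv' with hv'' | hv3
      rcases Multiset.mem_add.1 hv'' with hv1 | hv2
      · obtain ⟨m1', rfl⟩ := Multiset.exists_cons_of_mem hv1
        refine Or.inl (Or.inl (Or.inl ⟨m1', m2, m3, m4, ?_, by
          rw [Multiset.sum_cons] at h1; linarith, h2, h3, h4⟩))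
        have : v ::ₘ (m1' + m2 + m3 + m4) = v ::ₘ (rest : Multiset Int) := by
          rw [Multiset.cons_coe, ← hc]; simp [Multiset.cons_add]
        exact (Multiset.cons_inj_right v).1 this
      · obtain ⟨m2', rfl⟩ := Multiset.exists_cons_of_mem hv2
        refine Or.inl (Or.inl (Or.inr ⟨m1, m2', m3, m4, ?_, h1, by
          rw [Multiset.sum_cons] at h2; linarith, h3, h4⟩))
        have : v ::ₘ (m1 + m2' + m3 + m4) = v ::ₘ (rest : Multiset Int) := by
          rw [Multiset.cons_coe, ← hc]; simp [Multiset.cons_add, Multiset.add_cons]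
        exact (Multiset.cons_inj_right v).1 this
      · obtain ⟨m3', rfl⟩ := Multiset.exists_cons_of_mem hv3
        refine Or.inl (Or.inr ⟨m1, m2, m3', m4, ?_, h1, h2, by
          rw [Multiset.sum_cons] at h3; linarith, h4⟩)
        have : v ::ₘ (m1 + m2 + m3' + m4) = v ::ₘ (rest : Multiset Int) := by
          rw [Multiset.cons_coe, ← hc]; simp [Multiset.cons_add, Multiset.add_cons]
        exact (Multiset.cons_inj_right v).1 this
      · obtain ⟨m4', rfl⟩ := Multiset.exists_cons_of_mem hv4
        refine Or.inr ⟨m1, m2, m3, m4', ?_, h1, h2, h3, by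
          rw [Multiset.sum_cons] at h4; linarith⟩
        have : v ::ₘ (m1 + m2 + m3 + m4') = v ::ₘ (rest : Multiset Int) := by
          rw [Multiset.cons_coe, ← hc]; simp [Multiset.cons_add, Multiset.add_cons]
        exact (Multiset.cons_inj_right v).1 this

-- soundness of A's DFS: a successful search yields a semantic split
theorem dfsA_sound (t : List Int) (n : Int) :
    ∀ (fuel i : Nat) (cur : Int) (used : Nat), i < 4 →
      cur + (unusedMS t used).sum = ((4:Int) - (i:Int)) * n →
      dfsA t n fuel i cur used = true → SemA t n i cur used := by
  intro fuel
  induction fuel with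
  | zero => intro i cur used _ _ h; simp [dfsA] at h
  | succ fuel ih =>
    intro i cur used hi hinv h
    rw [dfsA] at h
    rw [if_neg (by omega)] at h
    by_cases hcn : n < cur
    · rw [if_pos hcn] at h; exact absurd h (by simp)
    rw [if_neg hcn] at h
    by_cases hce : cur = n
    · rw [if_pos hce] at h
      rw [hce] at hinv ⊢
      by_cases hi3 : i = 3
      · -- last side just finished: everything unused sums to 0
        subst hi3
        refine ⟨[0], unusedMS t used, by simp, ?_, by simp⟩
        push_cast at hinv
        norm_num at hinv
        linarith
      · have hr : ((4:Int) - (↑i + 1)) * n = ((4:Int) - ↑i) * n - n := by ring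
        have hinv' : (0:Int) + (unusedMS t used).sum = ((4:Int) - ((i+1 : Nat) : Int)) * n := by
          push_cast
          rw [hr]
          linarith
        obtain ⟨ps, junk, hmap, hjunk, hcover⟩ := ih (i+1) 0 used (by omega) hinv' h
        rw [if_pos (by omega)] at hmap
        refine ⟨0 :: ps, junk, ?_, hjunk, by simpa [Multiset.zero_add] using hcover⟩
        rw [if_pos hi]
        have h3i : 3 - i = (3 - (i+1)) + 1 := by omega
        rw [h3i, List.replicate_succ]
        simp only [List.map_cons, hmap]
        simp
    · rw [if_neg hce] at h
      obtain ⟨j, hjr, hj⟩ := List.any_eq_true.1 h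
      rw [List.mem_range] at hjr
      by_cases hb : used.testBit j
      · rw [if_pos hb] at hj; exact absurd hj (by simp)
      rw [if_neg hb] at hj
      have hsplit := unusedMS_or hjr hb
      have hinv' : (cur + t.getD j 0) + (unusedMS t (used ||| 2 ^ j)).sum = ((4:Int) - i) * n := by
        rw [hsplit, Multiset.sum_cons] at hinv
        linarith
      obtain ⟨ps, junk, hmap, hjunk, hcover⟩ := ih i (cur + t.getD j 0) (used ||| 2 ^ j) hi hinv' hj
      rw [if_pos hi] at hmap
      obtain ⟨p, rest, rfl⟩ : ∃ p rest, ps = p :: rest := by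
        cases ps with
        | nil => simp at hmap
        | cons p rest => exact ⟨p, rest, rfl⟩
      simp only [List.map_cons, List.cons.injEq] at hmap
      refine ⟨(t.getD j 0 ::ₘ p) :: rest, junk, ?_, hjunk, ?_⟩
      · rw [if_pos hi]
        simp only [List.map_cons, Multiset.sum_cons, hmap.2, List.cons.injEq]
        exact ⟨by rw [hmap.1]; ring, trivial⟩
      · rw [hsplit, ← hcover]
        simp only [List.sum_cons]
        rw [Multiset.cons_add, Multiset.cons_add]

-- completeness of A's DFS: a semantic split is found, given enough fuel
theorem dfsA_complete (t : List Int) (n : Int) (hn : 0 ≤ n) :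
    ∀ (fuel i : Nat) (cur : Int) (used : Nat), i ≤ 4 → cur ≤ n →
      (unusedIdx t.length used).length + (4 - i) + 1 ≤ fuel →
      SemA t n i cur used → dfsA t n fuel i cur used = true := by
  intro fuel
  induction fuel with
  | zero => intro i cur used _ _ hf _; omega
  | succ fuel ih =>
    intro i cur used hi hcur hf hsem
    rw [dfsA]
    by_cases hi4 : i = 4
    · rw [if_pos hi4]
    rw [if_neg hi4, if_neg (by omega : ¬ n < cur)]
    obtain ⟨ps, junk, hmap, hjunk, hcover⟩ := hsem
    rw [if_pos (by omega)] at hmap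
    obtain ⟨p, rest, rfl⟩ : ∃ p rest, ps = p :: rest := by
      cases ps with
      | nil => simp at hmap
      | cons p rest => exact ⟨p, rest, rfl⟩
    simp only [List.map_cons, List.cons.injEq] at hmap
    by_cases hce : cur = n
    · rw [if_pos hce]
      subst hce
      have hp0 : p.sum = 0 := by rw [hmap.1]; ring
      apply ih (i+1) 0 used (by omega) hn (by omega)
      refine ⟨rest, junk + p, ?_, by simp [hjunk, hp0], ?_⟩
      · by_cases hi3 : i + 1 < 4
        · rw [if_pos hi3, hmap.2]
          have h3i : 3 - i = (3 - (i+1)) + 1 := by omega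
          rw [h3i, List.replicate_succ]
          simp
        · rw [if_neg hi3]
          have h0 : (3 - i) = 0 := by omega
          rw [h0, List.replicate_zero] at hmap
          simp [List.map_eq_nil_iff.1 hmap.2]
      · rw [← hcover]
        simp only [List.sum_cons]
        rw [add_comm junk p]
        rw [← add_assoc, add_comm rest.sum p]
    · rw [if_neg hce]
      have hclt : cur < n := lt_of_le_of_ne hcur hce
      have hpsum : p.sum = n - cur := hmap.1
      have hpne : p ≠ 0 := by
        intro h0; rw [h0] at hpsum; simp at hpsum; omega
      -- choose a stick v from the current side's part with cur + v ≤ n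
      have hvex : ∃ v ∈ p, cur + v ≤ n := by
        by_cases hneg : ∃ v ∈ p, v ≤ 0
        · obtain ⟨v, hv, hv0⟩ := hneg
          exact ⟨v, hv, by omega⟩
        · push_neg at hneg
          obtain ⟨v, hv⟩ := Multiset.exists_mem_of_ne_zero hpne
          have : v ≤ p.sum := Multiset.single_le_sum (fun x hx => le_of_lt (hneg x hx)) v hv
          exact ⟨v, hv, by omega⟩
      obtain ⟨v, hvp, hvle⟩ := hvex
      have hvun : v ∈ unusedMS t used := by
        rw [← hcover]
        refine Multiset.mem_add.2 (Or.inl ?_)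
        simp only [List.sum_cons]
        exact Multiset.mem_add.2 (Or.inl hvp)
      obtain ⟨j, hjmem, hjv⟩ : ∃ j ∈ unusedIdx t.length used, t.getD j 0 = v := by
        simpa [unusedMS, List.mem_map] using hvun
      obtain ⟨hjr, hb⟩ := mem_unusedIdx.1 hjmem
      refine List.any_eq_true.2 ⟨j, List.mem_range.2 hjr, ?_⟩
      rw [if_neg hb]
      apply ih i (cur + t.getD j 0) (used ||| 2 ^ j) hi (by rw [hjv]; exact hvle)
        (by have := length_unusedIdx_or hjr hb; omega)
      -- the new state's semantic split: remove v from p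
      obtain ⟨p', rfl⟩ := Multiset.exists_cons_of_mem hvp
      refine ⟨p' :: rest, junk, ?_, hjunk, ?_⟩
      · rw [if_pos (by omega)]
        simp only [List.map_cons, hmap.2, List.cons.injEq]
        refine ⟨?_, trivial⟩
        have := hmap.1
        rw [Multiset.sum_cons] at this
        rw [hjv]; omega
      · have hms := unusedMS_or hjr hb
        rw [hms, hjv] at hcover
        have hkey : v ::ₘ ((p' :: rest).sum + junk) = v ::ₘ unusedMS t (used ||| 2 ^ j) := by
          rw [← hcover]
          simp only [List.sum_cons]
          rw [Multiset.cons_add, Multiset.cons_add]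
        exact (Multiset.cons_inj_right v).1 hkey

-- the two searches agree when the sum is 4n with n ≥ 0
theorem dfsA_eq_placeB (t : List Int) (n : Int) (hn : 0 ≤ n)
    (hsum : (t : Multiset Int).sum = 4 * n) :
    dfsA t n (t.length + 5) 0 0 0 = placeB n t 0 0 0 0 := by
  have hms0 : unusedMS t 0 = (t : Multiset Int) := unusedMS_zero t
  by_cases hA : dfsA t n (t.length + 5) 0 0 0 = true
  · rw [hA]
    obtain ⟨ps, junk, hmap, hjunk, hcover⟩ :=
      dfsA_sound t n (t.length + 5) 0 0 0 (by omega) (by rw [hms0, hsum]; push_cast; ring) hA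
    rw [if_pos (by omega)] at hmap
    obtain ⟨p1, p2, p3, p4, rfl⟩ : ∃ p1 p2 p3 p4, ps = [p1, p2, p3, p4] := by
      have hlen : ps.length = 4 := by
        have := congrArg List.length hmap; simpa using this
      match ps, hlen with
      | [p1, p2, p3, p4], _ => exact ⟨p1, p2, p3, p4, rfl⟩
    simp only [List.map_cons, List.map_nil, List.replicate, List.cons.injEq] at hmap
    symm
    rw [placeB_iff]
    refine ⟨p1 + junk, p2, p3, p4, ?_, ?_, ?_, ?_, ?_⟩
    · rw [← hms0, ← hcover]
      simp only [List.sum_cons, List.sum_nil]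
      rw [add_zero]
      abel
    · simp only [Multiset.sum_add, hjunk]
      have := hmap.1; omega
    · have := hmap.2.1; omega
    · have := hmap.2.2.1; omega
    · have := hmap.2.2.2.1; omega
  · rw [Bool.not_eq_true] at hA
    rw [hA]
    symm
    rw [Bool.eq_false_iff]
    intro hB
    obtain ⟨m1, m2, m3, m4, hcover, h1, h2, h3, h4⟩ := (placeB_iff n t 0 0 0 0).1 hB
    have : dfsA t n (t.length + 5) 0 0 0 = true := by
      apply dfsA_complete t n hn (t.length + 5) 0 0 0 (by omega) hn
      · have : (unusedIdx t.length 0).length ≤ t.length := by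
          unfold unusedIdx
          exact le_trans (List.length_filter_le _ _) (by simp)
        omega
      · refine ⟨[m1, m2, m3, m4], 0, ?_, by simp, ?_⟩
        · rw [if_pos (by omega)]
          simp only [List.map_cons, List.map_nil, List.replicate]
          simp only [zero_add] at h1 h2 h3 h4
          rw [h1, h2, h3, h4]
          norm_num
        · rw [hms0, ← hcover]
          simp only [List.sum_cons, List.sum_nil]
          abel
    rw [hA] at this
    exact absurd this (by simp)

-- ===== VERDICT (by name: the statement is the Claim_ definition above) =====
theorem makesquare_spec : Claim_equal_makesquare := by
  intro ms _ hpre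
  unfold Pre_makesquare at hpre
  unfold Spec_makesquare makesquare makesquare_alt
  set s := ms.sum with hs
  set n := PySem.Int.floordiv s 4 with hnd
  set r := PySem.Int.mod s 4 with hrd
  by_cases hg : r ≠ 0 ∨ ms.length < 4
  · simp only [if_pos hg]
  · simp only [if_neg hg]
    push_neg at hg
    set t := PySem.List.sorted ms (fun x => x) true with ht
    have htsum : (t : Multiset Int).sum = s := by
      have hperm : t.Perm ms := PySem.List.sorted_perm ms (fun x => x) true
      rw [hs]
      simpa using hperm.sum_eq
    have hsum4 : s = 4 * n + r := by
      have := PySem.Int.floordiv_mul_add_mod s 4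
      rw [← hnd, ← hrd] at this
      linarith
    have hs0 : 0 ≤ s := by
      rcases hpre with h | h | h
      · exact h
      · exact absurd hg.1 h
      · omega
    have hn : 0 ≤ n := by
      rw [hnd]
      rw [PySem.Int.le_floordiv_iff_mul_le (by omega)]
      simpa using hs0
    exact dfsA_eq_placeB t n hn (by rw [htsum, hsum4, hg.1]; ring)
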